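-- pv_equiv track=rewrite | github.com/seagullQ77/nfd-autotest | codewars/6kyu_numericals.py | numericals
-- ===== SOURCE A (Python) =====
-- def numericals(s):
--    lens = len(s)
--    lnum = []
--    for i in range(0,lens):
--        cn = s[0:i+1].count(s[i])
--        lnum.append(cn)
--    snum = map(str, lnum)
--    return ''.join(snum)
-- ===== SOURCE B (Python) =====
-- def numericals(s):
--     counts = {}
--     out = []
--     for ch in s:
--         counts[ch] = counts.get(ch, 0) + 1
--         out.append(str(counts[ch]))
--     return ''.join(out)
-- ===== Notes on version B (the rewrite author's own statement) =====
-- stated objective: faster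
-- what changed: Replaces A's per-index prefix slice s[0:i+1] plus substring count (a full rescan at every position) with a single left-to-right pass that maintains a dict of running per-character counts.
import Mathlib
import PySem

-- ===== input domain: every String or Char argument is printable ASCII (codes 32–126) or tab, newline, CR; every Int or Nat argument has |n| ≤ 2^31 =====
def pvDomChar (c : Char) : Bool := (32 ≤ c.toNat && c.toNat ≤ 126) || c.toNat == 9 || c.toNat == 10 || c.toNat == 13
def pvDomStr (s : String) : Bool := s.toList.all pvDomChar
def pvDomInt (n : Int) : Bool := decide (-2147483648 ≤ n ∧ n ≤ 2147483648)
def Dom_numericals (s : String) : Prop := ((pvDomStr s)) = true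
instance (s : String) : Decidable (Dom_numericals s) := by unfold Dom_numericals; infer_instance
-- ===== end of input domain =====

-- B replaces A's per-index prefix slice + rescan (O(n^2)) by a single pass with a dict of running counts (O(n)).

-- ===== PORT A =====
-- for i in range(0, lens): lnum.append(s[0:i+1].count(s[i])); return ''.join(map(str, lnum))
def numericals (s : String) : String :=
  let cs := s.toList
  let lnum : List Int :=
    (PySem.List.pyRange 0 (PySem.List.len cs) 1).foldl
      (fun acc i =>
        acc ++ [(PySem.List.count (PySem.List.slice cs (some 0) (some (i + 1)))
                  (PySem.List.pyGetD cs i ' ') : Int)]) []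
  PySem.Str.join "" (lnum.map PySem.Int.toStr)

-- ===== PORT B =====
-- counts = {}; for ch in s: counts[ch] = counts.get(ch,0)+1; out.append(str(counts[ch])); return ''.join(out)
def numericals_alt (s : String) : String :=
  let st := s.toList.foldl
    (fun (st : PySem.Dict Char Int × List String) ch =>
      let d := st.1.modify ch 0 (· + 1)
      (d, st.2 ++ [PySem.Int.toStr (d.getD ch 0)]))
    (PySem.Dict.empty, [])
  PySem.Str.join "" st.2

-- ===== PRECONDITION & SPEC =====
def Spec_numericals (s : String) (out : String) : Prop := out = numericals_alt s
instance (s : String) (out : String) : Decidable (Spec_numericals s out) := by unfold Spec_numericals; infer_instance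

-- ===== CLAIM (what is proved, stated in full; the proofs are below) =====
def Claim_equal_numericals : Prop := ∀ (s : String), Dom_numericals s → Spec_numericals s (numericals s)

-- ===== LEMMAS AND PROOFS =====

-- The common value: running count of each character over the scanned prefix `pre`.
def runCounts (pre : List Char) : List Char → List Int
  | [] => []
  | c :: cs => ((pre.count c : Int) + 1) :: runCounts (pre ++ [c]) cs

theorem runCounts_length (cs : List Char) : ∀ pre, (runCounts pre cs).length = cs.length := by
  induction cs with
  | nil => intro pre; rfl
  | cons c cs ih => intro pre; simp [runCounts, ih]

theorem runCounts_getElem (cs : List Char) : ∀ (pre : List Char) (k : Nat) (h : k < cs.length),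
    (runCounts pre cs)[k]'(by rw [runCounts_length]; exact h)
      = (((pre ++ cs.take (k + 1)).count cs[k] : Nat) : Int) := by
  induction cs with
  | nil => intro pre k h; simp at h
  | cons c cs ih =>
    intro pre k h
    cases k with
    | zero => simp [runCounts, List.count_append]
    | succ k =>
      have hk : k < cs.length := by simpa using h
      simpa [runCounts, List.append_assoc] using ih (pre ++ [c]) k hk

-- A's loop computes runCounts [] cs.
theorem a_list_eq (cs : List Char) :
    ((PySem.List.pyRange 0 (PySem.List.len cs) 1).foldl
      (fun acc i =>
        acc ++ [(PySem.List.count (PySem.List.slice cs (some 0) (some (i + 1)))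
                  (PySem.List.pyGetD cs i ' ') : Int)]) [])
    = runCounts [] cs := by
  rw [PySem.List.foldl_append_singleton_eq_map]
  simp only [PySem.List.len_eq, PySem.List.pyRange_zero_natCast, List.map_map, List.nil_append]
  apply List.ext_getElem
  · simp [runCounts_length]
  · intro k h1 h2
    have hk : k < cs.length := by rw [runCounts_length] at h2; exact h2
    rw [runCounts_getElem cs [] k hk]
    have hcast : ((k : Int) + 1) = ((k + 1 : Nat) : Int) := by push_cast; ring
    simp only [Function.comp, List.getElem_map, List.getElem_range, hcast,
      PySem.List.slice_zero_start, PySem.List.slice_to_natCast, PySem.List.pyGetD_natCast,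
      PySem.List.count_eq]
    rw [List.getD_eq_getElem cs ' ' hk]
    simp

-- B's loop invariant: starting from the counter of the already-scanned prefix.
theorem b_loop (cs : List Char) : ∀ (pre : List Char) (out : List String),
    (cs.foldl
      (fun (st : PySem.Dict Char Int × List String) ch =>
        let d := st.1.modify ch 0 (· + 1)
        (d, st.2 ++ [PySem.Int.toStr (d.getD ch 0)]))
      (PySem.Dict.counter pre, out)).2
    = out ++ (runCounts pre cs).map PySem.Int.toStr := by
  induction cs with
  | nil => intro pre out; simp [runCounts]
  | cons c cs ih =>
    intro pre out
    have hstep : (PySem.Dict.counter pre).modify c 0 (· + 1) = PySem.Dict.counter (pre ++ [c]) :=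
      (PySem.Dict.counter_append_singleton pre c).symm
    simp only [List.foldl_cons, hstep]
    rw [ih (pre ++ [c]) (out ++ [PySem.Int.toStr ((PySem.Dict.counter (pre ++ [c])).getD c 0)])]
    have hv : (PySem.Dict.counter (pre ++ [c])).getD c 0 = ((pre.count c : Nat) : Int) + 1 := by
      rw [PySem.Dict.getD_counter]
      simp [List.count_append]
    rw [hv]
    simp [runCounts]

-- ===== VERDICT (by name: the statement is the Claim_ definition above) =====
theorem numericals_spec : Claim_equal_numericals := by
  intro s _
  unfold Spec_numericals numericals numericals_alt
  have hinit : (PySem.Dict.empty : PySem.Dict Char Int) = PySem.Dict.counter [] := rfl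
  simp only [hinit, b_loop s.toList [] [], a_list_eq s.toList, List.nil_append]
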